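-- pv_equiv track=rewrite | github.com/Mathis-Royer/Latent_risk_factor | src/vae/build_vae.py | count_encoder_params
-- ===== SOURCE A (Python) =====
-- K_HEAD = (5, 21, 63)         # Inception head kernels
--
-- C_BRANCH = 48                # Filters per Inception branch
--
-- K_BODY = 7                   # Residual body kernel size
--
-- def count_encoder_params(
--     F: int,
--     K: int,
--     channels: list[int],
-- ) -> int:
--     """
--     Analytical parameter count for the encoder.
--
--     Inception head: sum over branches of (F * C_BRANCH * k + C_BRANCH + 2*C_BRANCH)
--     Residual body: sum over blocks of conv1 + conv2 + skip + batchnorms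
--     Projection: C_L*K + K (mu) + C_L*K + K (log_var)
--
--     :param F (int): Number of input features
--     :param K (int): Latent dimension
--     :param channels (list[int]): Channel progression [C_HEAD, C_1, ..., C_L]
--
--     :return count (int): Total number of encoder parameters
--     """
--     C_L = channels[-1]
--
--     # Inception head: 3 branches
--     p_head = 0
--     for k in K_HEAD:
--         # Conv1d: F -> C_BRANCH, kernel k
--         p_head += F * C_BRANCH * k + C_BRANCH
--         # BatchNorm1d: 2 * C_BRANCH (weight + bias)
--         p_head += 2 * C_BRANCH
--
--     # Residual body
--     p_body = 0
--     for i in range(1, len(channels)):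
--         c_in = channels[i - 1]
--         c_out = channels[i]
--
--         # Conv1 (stride=2): c_in * c_out * K_BODY + c_out
--         p_body += c_in * c_out * K_BODY + c_out
--         # BN1: 2 * c_out
--         p_body += 2 * c_out
--
--         # Conv2 (stride=1): c_out * c_out * K_BODY + c_out
--         p_body += c_out * c_out * K_BODY + c_out
--         # BN2: 2 * c_out
--         p_body += 2 * c_out
--
--         # Skip (1x1 conv, always active since stride changes dimensions)
--         p_body += c_in * c_out * 1 + c_out
--         # Skip BN: 2 * c_out
--         p_body += 2 * c_out
--
--     # Projection heads: mu and log_var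
--     p_proj = C_L * K + K  # mu
--     p_proj += C_L * K + K  # log_var
--
--     return p_head + p_body + p_proj
-- ===== SOURCE B (Python) =====
-- K_HEAD = (5, 21, 63)
-- C_BRANCH = 48
-- K_BODY = 7
--
-- def count_encoder_params(
--     F: int,
--     K: int,
--     channels: list[int],
-- ) -> int:
--     # Inception head, closed form: each branch is F*C_BRANCH*k + 3*C_BRANCH.
--     p_head = F * C_BRANCH * sum(K_HEAD) + 3 * len(K_HEAD) * C_BRANCH
--     # Residual body: each block simplifies to 8*c_in*c_out + 7*c_out**2 + 9*c_out;
--     # computed as three separate sums over the consecutive channel pairs.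
--     pairs = list(zip(channels, channels[1:]))
--     cross = sum(ci * co for ci, co in pairs)
--     squares = sum(co * co for _, co in pairs)
--     linear = sum(co for _, co in pairs)
--     p_body = 8 * cross + 7 * squares + 9 * linear
--     # Projection heads (mu + log_var), closed form.
--     p_proj = 2 * channels[-1] * K + 2 * K
--     return p_head + p_body + p_proj
-- ===== Notes on version B (the rewrite author's own statement) =====
-- stated objective: simpler
-- what changed: Replaces A's head loop by the closed form F*C_BRANCH*sum(K_HEAD)+9*C_BRANCH, and replaces the index-based accumulating body loop by three independent sums (cross products, squares, linear terms) over zip(channels, channels[1:]) combined via the algebraic simplification 8*c_in*c_out+7*c_out**2+9*c_out per block; projection is the closed form 2*C_L*K+2*K.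
import Mathlib
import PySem

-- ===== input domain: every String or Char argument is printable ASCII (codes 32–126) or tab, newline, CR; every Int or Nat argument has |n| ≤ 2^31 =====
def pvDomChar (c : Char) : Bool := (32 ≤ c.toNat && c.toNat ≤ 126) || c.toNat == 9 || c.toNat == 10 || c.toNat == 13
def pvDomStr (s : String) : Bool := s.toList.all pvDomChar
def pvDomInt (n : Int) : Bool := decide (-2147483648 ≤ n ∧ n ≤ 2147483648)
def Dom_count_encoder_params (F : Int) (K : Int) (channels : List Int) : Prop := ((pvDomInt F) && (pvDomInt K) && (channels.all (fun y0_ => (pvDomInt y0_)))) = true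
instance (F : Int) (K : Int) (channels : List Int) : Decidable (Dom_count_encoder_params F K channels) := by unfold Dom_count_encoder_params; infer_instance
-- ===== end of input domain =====

-- B replaces A's head loop and index-based body accumulation by closed forms and three
-- independent sums over consecutive channel pairs (objective: simpler); same results.


-- ===== PORT A =====
-- literal transliteration of A; channels[-1] / channels[i] are in range on Pre_
-- (nonempty channels), so the .getD 0 default is never taken there.
def count_encoder_params (F : Int) (K : Int) (channels : List Int) : Int :=
  let C_L := (PySem.List.pyGet? channels (-1)).getD 0
  let p_head := [(5 : Int), 21, 63].foldl
    (fun acc k => (acc + (F * 48 * k + 48)) + 2 * 48) 0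
  let p_body := (PySem.List.pyRange 1 (channels.length : Int) 1).foldl
    (fun acc i =>
      let c_in := (PySem.List.pyGet? channels (i - 1)).getD 0
      let c_out := (PySem.List.pyGet? channels i).getD 0
      (((((acc + (c_in * c_out * 7 + c_out)) + 2 * c_out)
        + (c_out * c_out * 7 + c_out)) + 2 * c_out)
        + (c_in * c_out * 1 + c_out)) + 2 * c_out) 0
  let p_proj := (C_L * K + K) + (C_L * K + K)
  p_head + p_body + p_proj

-- ===== PORT B =====
def count_encoder_params_alt (F : Int) (K : Int) (channels : List Int) : Int :=
  let p_head := F * 48 * ((5 : Int) + 21 + 63) + 3 * 3 * 48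
  let pairs := channels.zip (channels.drop 1)   -- zip(channels, channels[1:])
  let cross := (pairs.map (fun p => p.1 * p.2)).sum
  let squares := (pairs.map (fun p => p.2 * p.2)).sum
  let linear := (pairs.map (fun p => p.2)).sum
  let p_body := 8 * cross + 7 * squares + 9 * linear
  let p_proj := 2 * ((PySem.List.pyGet? channels (-1)).getD 0) * K + 2 * K
  p_head + p_body + p_proj

-- ===== PRECONDITION & SPEC =====
-- Pre_ excludes only empty channels, on which A raises IndexError at channels[-1].
def Pre_count_encoder_params (F : Int) (K : Int) (channels : List Int) : Prop := channels ≠ []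
instance (F : Int) (K : Int) (channels : List Int) : Decidable (Pre_count_encoder_params F K channels) := by unfold Pre_count_encoder_params; infer_instance
def pvWitness_count_encoder_params : Int × Int × List Int := (3, 4, [5, 6, 7])

def Spec_count_encoder_params (F : Int) (K : Int) (channels : List Int) (out : Int) : Prop := out = count_encoder_params_alt F K channels
instance (F : Int) (K : Int) (channels : List Int) (out : Int) : Decidable (Spec_count_encoder_params F K channels out) := by unfold Spec_count_encoder_params; infer_instance

-- ===== CLAIM (what is proved, stated in full; the proofs are below) =====
def Claim_equal_count_encoder_params : Prop := ∀ (F : Int) (K : Int) (channels : List Int), Dom_count_encoder_params F K channels → Pre_count_encoder_params F K channels → Spec_count_encoder_params F K channels (count_encoder_params F K channels)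

-- ===== LEMMAS AND PROOFS =====

-- A's body term at index i, on list l.
def pvBodyTerm (l : List Int) (i : Int) : Int :=
  let c_in := (PySem.List.pyGet? l (i - 1)).getD 0
  let c_out := (PySem.List.pyGet? l i).getD 0
  8 * (c_in * c_out) + 7 * (c_out * c_out) + 9 * c_out

lemma body_foldl_eq_sum (l : List Int) :
    (PySem.List.pyRange 1 (l.length : Int) 1).foldl
      (fun acc i =>
        let c_in := (PySem.List.pyGet? l (i - 1)).getD 0
        let c_out := (PySem.List.pyGet? l i).getD 0
        (((((acc + (c_in * c_out * 7 + c_out)) + 2 * c_out)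
          + (c_out * c_out * 7 + c_out)) + 2 * c_out)
          + (c_in * c_out * 1 + c_out)) + 2 * c_out) 0
    = ((PySem.List.pyRange 1 (l.length : Int) 1).map (pvBodyTerm l)).sum := by
  rw [PySem.List.foldl_congr_mem (g := fun acc i => acc + pvBodyTerm l i)]
  · rw [PySem.List.foldl_add]; simp
  · intro acc x _; simp only [pvBodyTerm]; ring

lemma range_map_eq_zip_map (l : List Int) :
    (PySem.List.pyRange 1 (l.length : Int) 1).map (pvBodyTerm l)
    = (l.zip (l.drop 1)).map
        (fun p => 8 * (p.1 * p.2) + 7 * (p.2 * p.2) + 9 * p.2) := by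
  apply List.ext_getElem
  · simp [PySem.List.length_pyRange_one, List.length_zip]
  · intro k h1 h2
    have hlen : (PySem.List.pyRange 1 (l.length : Int) 1).length = l.length - 1 := by
      simp [PySem.List.length_pyRange_one]
    have hk : k < l.length - 1 := by rw [List.length_map, hlen] at h1; exact h1
    have hk1 : k + 1 < l.length := by omega
    have hk0 : k < l.length := by omega
    simp only [List.getElem_map, PySem.List.getElem_pyRange_one, List.getElem_zip,
      List.getElem_drop, pvBodyTerm]
    have e1 : (1 : Int) + (k : Int) - 1 = ((k : Nat) : Int) := by ring
    have e2 : ((1 : Int) + (k : Int)) = ((k + 1 : Nat) : Int) := by push_cast; ring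
    rw [e1, e2, PySem.List.pyGet?_natCast, PySem.List.pyGet?_natCast]
    simp [hk0, hk1, Nat.add_comm 1 k]

theorem count_encoder_params_spec : Claim_equal_count_encoder_params := by
  intro F K channels _ hpre
  unfold Spec_count_encoder_params count_encoder_params count_encoder_params_alt
  simp only [body_foldl_eq_sum, range_map_eq_zip_map]
  have hsum : ∀ (ps : List (Int × Int)),
      (ps.map (fun p => 8 * (p.1 * p.2) + 7 * (p.2 * p.2) + 9 * p.2)).sum
      = 8 * (ps.map (fun p => p.1 * p.2)).sum + 7 * (ps.map (fun p => p.2 * p.2)).sum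
        + 9 * (ps.map (fun p => p.2)).sum := by
    intro ps; induction ps with
    | nil => simp
    | cons p t ih => simp [ih]; ring
  rw [hsum]
  norm_num [List.foldl]
  ring
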